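-- pv_equiv track=rewrite | github.com/DreamingHunter/UTPB-COSC-6350-Project4 | handshakes.py | simplifyAesDecrypt
-- ===== SOURCE A (Python) =====
-- def xorBytes(byte_data, key):
--     return [b ^ key for b in byte_data]
--
-- def simplifyAesDecrypt(session_key, encrypted_data):
--     rounds = 5
--     byte_data = encrypted_data
--
--     for _ in range(rounds):
--         byte_data = byte_data[-1:] + byte_data[:-1]
--         byte_data = xorBytes(byte_data, session_key)
--
--     byte_data = xorBytes(byte_data, session_key)
--
--     return ''.join(chr(b) for b in byte_data)
-- ===== SOURCE B (Python) =====
-- def simplifyAesDecrypt(session_key, encrypted_data):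
--     # XOR by session_key is applied 6 times (even) and cancels; five right
--     # rotations by 1 compose into one right rotation by 5 (mod length).
--     n = len(encrypted_data)
--     shift = 5 % n if n else 0
--     cut = n - shift
--     rotated = encrypted_data[cut:] + encrypted_data[:cut]
--     return ''.join(chr(b) for b in rotated)
-- ===== Notes on version B (the rewrite author's own statement) =====
-- stated objective: simpler
-- what changed: Replaced the five rotate-by-1-then-XOR rounds plus final XOR by a single closed-form right-rotation by 5 % n (two slices), dropping all XOR passes since XOR by the same key an even number of times cancels.
import Mathlib
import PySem

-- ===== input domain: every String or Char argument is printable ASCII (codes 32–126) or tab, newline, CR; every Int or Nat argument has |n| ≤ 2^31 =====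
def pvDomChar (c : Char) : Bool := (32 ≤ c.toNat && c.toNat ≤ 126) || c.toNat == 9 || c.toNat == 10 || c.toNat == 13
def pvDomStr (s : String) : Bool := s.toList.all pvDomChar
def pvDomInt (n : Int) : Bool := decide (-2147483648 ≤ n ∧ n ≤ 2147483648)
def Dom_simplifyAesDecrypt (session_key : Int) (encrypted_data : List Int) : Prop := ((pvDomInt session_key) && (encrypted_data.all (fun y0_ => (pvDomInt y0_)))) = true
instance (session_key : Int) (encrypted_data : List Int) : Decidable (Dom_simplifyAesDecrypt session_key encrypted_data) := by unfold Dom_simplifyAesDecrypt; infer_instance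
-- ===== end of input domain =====

-- B replaces the five rotate-by-1 + XOR rounds and final XOR by one closed-form
-- rotation slice (the XORs cancel); objective: simpler.


-- ===== PORT A =====
-- helper: xorBytes(byte_data, key) = [b ^ key for b in byte_data]
def xorBytesPort (byte_data : List Int) (key : Int) : List Int :=
  byte_data.map (fun b => PySem.Int.bxor b key)

def simplifyAesDecrypt (session_key : Int) (encrypted_data : List Int) : String :=
  let byte_data := encrypted_data
  let byte_data := (PySem.List.pyRange 0 5 1).foldl
    (fun bd _ =>
      xorBytesPort (PySem.List.slice bd (some (-1)) none ++ PySem.List.slice bd none (some (-1)))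
        session_key)
    byte_data
  let byte_data := xorBytesPort byte_data session_key
  -- ''.join(chr(b) for b in byte_data); Char.ofNat b.toNat is exact for chr on the
  -- valid non-surrogate codepoints admitted by Pre_
  String.mk (byte_data.map (fun b => Char.ofNat b.toNat))

-- ===== PORT B =====
def simplifyAesDecrypt_alt (session_key : Int) (encrypted_data : List Int) : String :=
  let n := encrypted_data.length
  let shift := if n ≠ 0 then 5 % n else 0
  let cut := n - shift
  -- encrypted_data[cut:] + encrypted_data[:cut] with 0 ≤ cut ≤ n: exact as drop/take
  String.mk ((encrypted_data.drop cut ++ encrypted_data.take cut).map (fun b => Char.ofNat b.toNat))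

-- ===== PRECONDITION & SPEC =====
-- Pre_ excludes elements outside [0, 0x10FFFF], on which Python's chr raises ValueError, and
-- the surrogate codepoints 0xD800–0xDFFF, on which both programs return the same lone-surrogate
-- str — not a UTF-8-encodable string, hence not a value of the Lean String type.
def Pre_simplifyAesDecrypt (session_key : Int) (encrypted_data : List Int) : Prop :=
  ∀ b ∈ encrypted_data, 0 ≤ b ∧ b < 1114112 ∧ ¬(55296 ≤ b ∧ b < 57344)
instance (session_key : Int) (encrypted_data : List Int) : Decidable (Pre_simplifyAesDecrypt session_key encrypted_data) := by unfold Pre_simplifyAesDecrypt; infer_instance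

def pvWitness_simplifyAesDecrypt : Int × List Int := (7, [65, 66, 67])

def Spec_simplifyAesDecrypt (session_key : Int) (encrypted_data : List Int) (out : String) : Prop := out = simplifyAesDecrypt_alt session_key encrypted_data
instance (session_key : Int) (encrypted_data : List Int) (out : String) : Decidable (Spec_simplifyAesDecrypt session_key encrypted_data out) := by unfold Spec_simplifyAesDecrypt; infer_instance

-- ===== CLAIM (what is proved, stated in full; the proofs are below) =====
def Claim_equal_simplifyAesDecrypt : Prop := ∀ (session_key : Int) (encrypted_data : List Int), Dom_simplifyAesDecrypt session_key encrypted_data → Pre_simplifyAesDecrypt session_key encrypted_data → Spec_simplifyAesDecrypt session_key encrypted_data (simplifyAesDecrypt session_key encrypted_data)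

-- ===== LEMMAS AND PROOFS =====

-- XOR by the same key twice is the identity (Python-exact two's-complement xor)
theorem pvBxorCancel (a k : Int) : PySem.Int.bxor (PySem.Int.bxor a k) k = a := by
  by_cases ha : 0 ≤ a <;> by_cases hk : 0 ≤ k <;>
    simp only [PySem.Int.bxor, ha, hk, if_pos] <;>
    simp_all <;> omega

theorem pvMapBxorBxor (k : Int) (m : List Int) :
    (m.map (fun b => PySem.Int.bxor b k)).map (fun b => PySem.Int.bxor b k) = m := by
  induction m with
  | nil => rfl
  | cons a t ih => simp [ih, pvBxorCancel]

-- A's one-step rotation slice, as List.rotate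
theorem pvRotSliceEq (m : List Int) :
    PySem.List.slice m (some (-1)) none ++ PySem.List.slice m none (some (-1))
      = m.rotate (m.length - 1) := by
  rw [PySem.List.slice_from_neg_one, PySem.List.slice_to_neg_one, List.dropLast_eq_take,
    List.rotate_eq_drop_append_take (Nat.sub_le _ _)]

-- the rotation slice commutes with a map
theorem pvRotSliceMap (m : List Int) (f : Int → Int) :
    PySem.List.slice (m.map f) (some (-1)) none ++ PySem.List.slice (m.map f) none (some (-1))
      = (PySem.List.slice m (some (-1)) none ++ PySem.List.slice m none (some (-1))).map f := by
  rw [PySem.List.slice_from_neg_one, PySem.List.slice_to_neg_one,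
    PySem.List.slice_from_neg_one, PySem.List.slice_to_neg_one]
  simp [List.dropLast_eq_take, List.map_take, List.map_drop]

theorem pvModArith (n : ℕ) (h : 0 < n) : (5 * (n - 1)) % n = (n - 5 % n) % n := by
  rcases Nat.lt_or_ge n 6 with h6 | h6
  · interval_cases n <;> rfl
  · have h5 : 5 % n = 5 := Nat.mod_eq_of_lt (by omega)
    have h51 : 5 * (n - 1) = (n - 5) + 4 * n := by omega
    rw [h5, h51, Nat.add_mul_mod_self_right]

-- rotating five times by (length - 1) is B's closed-form slice
theorem pvRot5 (l : List Int) :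
    l.rotate (5 * (l.length - 1))
      = l.drop (l.length - (if l.length ≠ 0 then 5 % l.length else 0))
        ++ l.take (l.length - (if l.length ≠ 0 then 5 % l.length else 0)) := by
  rcases Nat.eq_zero_or_pos l.length with h0 | hpos
  · have : l = [] := List.eq_nil_of_length_eq_zero h0
    subst this; rfl
  · rw [if_pos (Nat.pos_iff_ne_zero.mp hpos)]
    have hle : l.length - 5 % l.length ≤ l.length := Nat.sub_le _ _
    calc l.rotate (5 * (l.length - 1))
        = l.rotate (5 * (l.length - 1) % l.length) := (List.rotate_mod _ _).symm
      _ = l.rotate ((l.length - 5 % l.length) % l.length) := by rw [pvModArith _ hpos]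
      _ = l.rotate (l.length - 5 % l.length) := List.rotate_mod _ _
      _ = _ := List.rotate_eq_drop_append_take hle

-- ===== VERDICT (by name: the statement is the Claim_ definition above) =====
theorem simplifyAesDecrypt_spec : Claim_equal_simplifyAesDecrypt := by
  intro sk l _ _
  unfold Spec_simplifyAesDecrypt simplifyAesDecrypt simplifyAesDecrypt_alt
  have hr : PySem.List.pyRange 0 5 1 = [0, 1, 2, 3, 4] := rfl
  rw [hr]
  simp only [List.foldl_cons, List.foldl_nil, xorBytesPort]
  simp only [pvRotSliceMap, pvMapBxorBxor]
  simp only [pvRotSliceEq, List.length_rotate, List.rotate_rotate]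
  rw [show l.length - 1 + (l.length - 1) + (l.length - 1) + (l.length - 1) + (l.length - 1)
        = 5 * (l.length - 1) from by ring, pvRot5]
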